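-- pv_equiv track=rewrite | github.com/aleena2121/Python | Logical Problems/character_positioned_at_center.py | is_char_at_center
-- ===== SOURCE A (Python) =====
-- def is_char_at_center(s):
--     """
--     Function to check whether the character is positioned in the very centre of the string or not
--
--     Args:
--     s: a string containing spaces and a character
--
--     Returns:
--     True or False
--     """
--     non_space_index = -1
--     for i, char in enumerate(s):
--         if char != ' ':
--             non_space_index = i
--             break
--     left_spaces = non_space_index
--     right_spaces = len(s) - non_space_index - 1
--     return left_spaces == right_spaces
-- ===== SOURCE B (Python) =====
-- def is_char_at_center(s):
--     if len(s) % 2 == 0: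
--         return False
--     m = len(s) // 2
--     return s[m] != ' ' and s[:m].count(' ') == m
-- ===== Notes on version B (the rewrite author's own statement) =====
-- stated objective: simpler
-- what changed: Instead of scanning for the first non-space index and comparing left vs right space counts, B computes the center position directly: even length returns False, otherwise it checks the middle character is non-space and every character before it is a space.
import Mathlib
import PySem

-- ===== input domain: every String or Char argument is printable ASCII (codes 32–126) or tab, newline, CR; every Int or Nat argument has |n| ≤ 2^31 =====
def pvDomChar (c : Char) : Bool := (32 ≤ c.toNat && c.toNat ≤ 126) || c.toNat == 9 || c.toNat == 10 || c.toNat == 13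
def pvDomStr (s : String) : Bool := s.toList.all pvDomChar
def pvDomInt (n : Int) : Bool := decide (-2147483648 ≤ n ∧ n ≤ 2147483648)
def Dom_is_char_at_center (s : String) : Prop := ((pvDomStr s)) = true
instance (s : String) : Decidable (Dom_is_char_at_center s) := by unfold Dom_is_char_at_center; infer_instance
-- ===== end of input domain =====

-- B checks the center directly: even length → False; else middle char non-space and all chars before it spaces (simpler than A's scan-and-subtract).


-- ===== PORT A =====
-- the for-loop with break: first index whose char is not ' ', else the initial -1
def pvA_loop : List (Int × Char) → Int
  | [] => -1
  | (i, c) :: rest => if c ≠ ' ' then i else pvA_loop rest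

def is_char_at_center (s : String) : Bool :=
  let non_space_index := pvA_loop (PySem.List.enumerate s.toList)
  let left_spaces := non_space_index
  let right_spaces := (s.toList.length : Int) - non_space_index - 1
  decide (left_spaces = right_spaces)

-- ===== PORT B =====
def is_char_at_center_alt (s : String) : Bool :=
  let l := s.toList
  if l.length % 2 == 0 then false
  else
    let m := l.length / 2
    (l[m]? != some ' ') && ((l.take m).count ' ' == m)

-- ===== PRECONDITION & SPEC =====
def Spec_is_char_at_center (s : String) (out : Bool) : Prop := out = is_char_at_center_alt s
instance (s : String) (out : Bool) : Decidable (Spec_is_char_at_center s out) := by unfold Spec_is_char_at_center; infer_instance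

-- ===== CLAIM (what is proved, stated in full; the proofs are below) =====
def Claim_equal_is_char_at_center : Prop := ∀ (s : String), Dom_is_char_at_center s → Spec_is_char_at_center s (is_char_at_center s)

-- ===== LEMMAS AND PROOFS =====

lemma pvA_loop_enumerate (l : List Char) (k : Int) :
    pvA_loop (PySem.List.enumerate l k) =
      if l.findIdx (fun c => c ≠ ' ') < l.length then k + l.findIdx (fun c => c ≠ ' ') else -1 := by
  induction l generalizing k with
  | nil => simp [pvA_loop, PySem.List.enumerate]
  | cons c rest ih =>
    rw [PySem.List.enumerate_cons]
    by_cases hc : c = ' '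
    · subst hc
      have h1 : pvA_loop ((k, ' ') :: PySem.List.enumerate rest (k + 1)) =
          pvA_loop (PySem.List.enumerate rest (k + 1)) := by simp [pvA_loop]
      rw [h1, ih]
      simp only [List.findIdx_cons, decide_not, decide_true, Bool.not_true, cond_false,
        List.length_cons]
      split_ifs with h2 h3 h3
      · push_cast; ring
      · omega
      · omega
      · rfl
    · have h1 : pvA_loop ((k, c) :: PySem.List.enumerate rest (k + 1)) = k := by
        simp [pvA_loop, hc]
      rw [h1]
      simp [List.findIdx_cons, hc]

lemma count_take_eq_iff (l : List Char) (m : Nat) (hm : m ≤ l.length) :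
    ((l.take m).count ' ' = m) ↔ ∀ i (h : i < m), l[i]'(lt_of_lt_of_le h hm) = ' ' := by
  have hlen : (l.take m).length = m := by simp [Nat.min_eq_left hm]
  constructor
  · intro hcnt i hi
    have hall : ∀ b ∈ l.take m, ' ' = b := List.count_eq_length.mp (hcnt.trans hlen.symm)
    have hmem : l[i]'(lt_of_lt_of_le hi hm) ∈ l.take m :=
      List.mem_take_iff_getElem.mpr ⟨i, by omega, rfl⟩
    exact (hall _ hmem).symm
  · intro hall
    conv_rhs => rw [← hlen]
    rw [List.count_eq_length]
    intro b hb
    obtain ⟨i, hi, rfl⟩ := List.mem_iff_getElem.mp hb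
    rw [List.getElem_take]
    exact (hall i (by rw [hlen] at hi; omega)).symm

lemma main_list (l : List Char) :
    (decide ((pvA_loop (PySem.List.enumerate l)) = (l.length : Int) - (pvA_loop (PySem.List.enumerate l)) - 1))
    = (if l.length % 2 == 0 then false
       else (l[l.length / 2]? != some ' ') && ((l.take (l.length / 2)).count ' ' == l.length / 2)) := by
  rw [show PySem.List.enumerate l = PySem.List.enumerate l 0 from rfl, pvA_loop_enumerate]
  set p : Char → Bool := fun c => c ≠ ' ' with hp
  set j := l.findIdx p with hj
  set n := l.length with hn
  set m := n / 2 with hmn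
  by_cases hfound : j < n
  · -- first non-space exists at index j
    rw [if_pos hfound]
    have hj_sat : l[j]'hfound ≠ ' ' := by
      have h := List.findIdx_getElem (p := p) (xs := l) (w := hfound)
      exact of_decide_eq_true h
    have hj_pre : ∀ i (h : i < j), l[i]'(lt_trans h hfound) = ' ' := by
      intro i hi
      have h := List.not_of_lt_findIdx (p := p) (xs := l) hi
      have h2 : decide (l[i]'(lt_trans hi hfound) ≠ ' ') = false := h
      simpa using h2
    by_cases heq : (0 : Int) + j = (n : Int) - ((0 : Int) + j) - 1
    · -- A returns true: 2j+1 = n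
      have h2 : 2 * j + 1 = n := by omega
      have hodd : n % 2 ≠ 0 := by omega
      have hmj : m = j := by omega
      rw [if_neg (by simpa using hodd)]
      have hget : l[m]? = some (l[j]'hfound) := by
        rw [hmj]; exact List.getElem?_eq_getElem hfound
      have hcnt : (l.take m).count ' ' = m := by
        rw [count_take_eq_iff l m (by omega)]
        intro i hi; exact hj_pre i (by omega)
      rw [decide_eq_true heq, hget]
      have h1 : (some (l[j]'hfound) != some ' ') = true := by
        simpa using hj_sat
      rw [h1, hcnt]
      simp
    · -- A returns false
      rw [decide_eq_false heq]
      split_ifs with hpar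
      · rfl
      · -- n odd; show RHS is false
        have hodd : n % 2 = 1 := by
          simp only [beq_iff_eq] at hpar; omega
        have hmlt : m < n := by omega
        by_cases hmj : m = j
        · exfalso; apply heq; omega
        symm
        by_cases hjm : j < m
        · -- char at j < m is non-space, so prefix count ≠ m
          have : (l.take m).count ' ' ≠ m := fun h =>
            hj_sat ((count_take_eq_iff l m (by omega)).mp h j hjm)
          simp [this]
        · -- m < j: l[m] is a space
          have hmj' : m < j := by omega
          have hsp : l[m]? = some ' ' := by
            rw [List.getElem?_eq_getElem hmlt]
            exact congrArg some (hj_pre m hmj')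
          rw [hsp]
          simp
  · -- no non-space character: loop returns -1
    rw [if_neg hfound]
    have hall : ∀ i (h : i < n), l[i]'h = ' ' := by
      intro i hi
      have hjlen : j = n := le_antisymm (List.findIdx_le_length) (le_of_not_gt hfound)
      have := List.not_of_lt_findIdx (p := p) (xs := l) (by omega : i < l.findIdx p)
      simpa [hp] using this
    have hA : decide ((-1 : Int) = (n : Int) - (-1) - 1) = false := by
      rw [decide_eq_false]; omega
    rw [hA]
    split_ifs with hpar
    · rfl
    · have hodd : n % 2 = 1 := by simp only [beq_iff_eq] at hpar; omega
      have hmlt : m < n := by omega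
      have hsp : l[m]? = some ' ' := by
        rw [List.getElem?_eq_getElem hmlt]; exact congrArg some (hall m hmlt)
      rw [hsp]
      simp

-- ===== VERDICT (by name: the statement is the Claim_ definition above) =====
theorem is_char_at_center_spec : Claim_equal_is_char_at_center := by
  intro s _
  unfold Spec_is_char_at_center is_char_at_center is_char_at_center_alt
  simpa using main_list s.toList
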